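-- pv_equiv track=rewrite | github.com/gerein/PyZwaver | pyzwaver/node.py | BitsToSetWithOffset
-- ===== SOURCE A (Python) =====
-- from typing import List, Set, Mapping
--
-- def BitsToSetWithOffset(x: int, offset: int) -> Set[int]:
--     out = set()
--     pos = 0
--     while x:
--         if (x & 1) == 1: out.add(pos + offset)
--         pos += 1
--         x >>= 1
--     return out
-- ===== SOURCE B (Python) =====
-- def BitsToSetWithOffset(x: int, offset: int):
--     out = set()
--     while x:
--         b = x & -x                      # isolate lowest set bit
--         out.add(b.bit_length() - 1 + offset)
--         x &= x - 1                      # clear lowest set bit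
--     return out
-- ===== Notes on version B (the rewrite author's own statement) =====
-- stated objective: alternative
-- what changed: Instead of scanning every bit position with a per-position parity test and an explicit position counter, B iterates only over the set bits: it isolates the lowest set bit with x & -x, derives its index via bit_length, and clears it with x &= x-1.
import Mathlib
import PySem

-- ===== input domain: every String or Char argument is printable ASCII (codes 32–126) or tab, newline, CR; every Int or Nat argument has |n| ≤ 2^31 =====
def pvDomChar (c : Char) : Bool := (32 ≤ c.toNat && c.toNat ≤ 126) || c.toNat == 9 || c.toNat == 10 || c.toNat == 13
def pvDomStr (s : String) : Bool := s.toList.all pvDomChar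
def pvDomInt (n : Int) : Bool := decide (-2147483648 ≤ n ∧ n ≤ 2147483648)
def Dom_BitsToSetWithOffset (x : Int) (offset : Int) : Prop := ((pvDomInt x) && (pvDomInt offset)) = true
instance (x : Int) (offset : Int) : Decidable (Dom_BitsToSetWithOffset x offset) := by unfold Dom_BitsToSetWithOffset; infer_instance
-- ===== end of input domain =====

-- B visits only the set bits (lowest-set-bit isolation / clearing) instead of scanning every
-- bit position with a parity test and a position counter; same return value (objective: alternative).

-- ===== PORT A =====
-- Python's `while x:` never terminates for x < 0 (x >>= 1 converges to -1), so nothing is claimed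
-- there beyond the ports' (identical) values; the loop state is carried as a Nat (x.toNat, exact for
-- 0 ≤ x, where Python returns); `x & 1` is x % 2, `x >>= 1` is x / 2.
def bitsLoopA (x : Nat) (pos : Int) (offset : Int) (out : PySem.Set Int) : PySem.Set Int :=
  if _h : x = 0 then out
  else
    bitsLoopA (x / 2) (pos + 1) offset
      (if x % 2 = 1 then PySem.Set.add out (pos + offset) else out)
termination_by x
decreasing_by exact Nat.div_lt_self (Nat.pos_of_ne_zero ‹_›) one_lt_two

def BitsToSetWithOffset (x : Int) (offset : Int) : List Int :=
  bitsLoopA x.toNat 0 offset PySem.Set.empty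

-- ===== PORT B =====
-- On Nat (x > 0 inside the loop): Python's `x & -x` (lowest set bit) is x ^^^ (x &&& (x - 1)),
-- `b.bit_length() - 1` for the power of two b is Nat.log2 b, and `x &= x - 1` clears that bit;
-- each step is exact for x > 0 (Python diverges for x < 0, like A).
def bitsLoopB (x : Nat) (offset : Int) (out : PySem.Set Int) : PySem.Set Int :=
  if _h : x = 0 then out
  else
    let b := x ^^^ (x &&& (x - 1))
    bitsLoopB (x &&& (x - 1)) offset (PySem.Set.add out ((Nat.log2 b : Int) + offset))
termination_by x
decreasing_by
  exact Nat.lt_of_le_of_lt (Nat.and_le_right) (Nat.sub_lt (Nat.pos_of_ne_zero ‹_›) one_pos)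

def BitsToSetWithOffset_alt (x : Int) (offset : Int) : List Int :=
  bitsLoopB x.toNat offset PySem.Set.empty

-- ===== PRECONDITION & SPEC =====
def Spec_BitsToSetWithOffset (x : Int) (offset : Int) (out : List Int) : Prop := out = BitsToSetWithOffset_alt x offset
instance (x : Int) (offset : Int) (out : List Int) : Decidable (Spec_BitsToSetWithOffset x offset out) := by unfold Spec_BitsToSetWithOffset; infer_instance

-- ===== CLAIM (what is proved, stated in full; the proofs are below) =====
def Claim_equal_BitsToSetWithOffset : Prop := ∀ (x : Int) (offset : Int), Dom_BitsToSetWithOffset x offset → Spec_BitsToSetWithOffset x offset (BitsToSetWithOffset x offset)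

-- ===== LEMMAS AND PROOFS =====

-- Ascending list of set-bit indices of a Nat (the common characterisation of both loops).
def bitsOf (x : Nat) : List Int :=
  if _h : x = 0 then []
  else (if x % 2 = 1 then [0] else []) ++ (bitsOf (x / 2)).map (· + 1)
termination_by x
decreasing_by exact Nat.div_lt_self (Nat.pos_of_ne_zero ‹_›) one_lt_two

lemma bitsOf_nonneg (x : Nat) : ∀ i ∈ bitsOf x, 0 ≤ i := by
  induction x using Nat.strong_induction_on with
  | _ x ih =>
    intro i hi
    rw [bitsOf] at hi
    split at hi
    · simp at hi
    · rename_i h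
      rcases List.mem_append.1 hi with hi | hi
      · split at hi <;> simp at hi
        omega
      · obtain ⟨b, hb, rfl⟩ := List.mem_map.1 hi
        have := ih (x / 2) (Nat.div_lt_self (Nat.pos_of_ne_zero h) one_lt_two) b hb
        omega

lemma bitsOf_pairwise (x : Nat) : (bitsOf x).Pairwise (· < ·) := by
  induction x using Nat.strong_induction_on with
  | _ x ih =>
    rw [bitsOf]
    split
    · simp
    · rename_i h
      have tail : ((bitsOf (x / 2)).map (· + 1)).Pairwise (· < ·) :=
        (ih (x / 2) (Nat.div_lt_self (Nat.pos_of_ne_zero h) one_lt_two)).map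
          (· + 1) (by intro a b hab; simpa using hab)
      split
      · refine List.Pairwise.cons ?_ tail
        intro a ha
        obtain ⟨b, hb, rfl⟩ := List.mem_map.1 ha
        have := bitsOf_nonneg (x / 2) b hb
        omega
      · simpa using tail

lemma and_pred_of_odd (x : Nat) (h : x % 2 = 1) : x &&& (x - 1) = x - 1 := by
  apply Nat.eq_of_testBit_eq
  intro i
  rw [Nat.testBit_and]
  cases i with
  | zero => simp [Nat.testBit_zero]; omega
  | succ i =>
      simp only [Nat.testBit_succ]
      rw [show x/2 = (x-1)/2 by omega, Bool.and_self]

lemma xor_pred_of_odd (x : Nat) (h : x % 2 = 1) : x ^^^ (x - 1) = 1 := by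
  apply Nat.eq_of_testBit_eq
  intro i
  rw [Nat.testBit_xor]
  cases i with
  | zero => simp [Nat.testBit_zero]; omega
  | succ i =>
      simp only [Nat.testBit_succ]
      rw [show x/2 = (x-1)/2 by omega, Bool.xor_self,
          show (1:Nat)/2 = 0 by omega, Nat.zero_testBit]

lemma and_two_mul (y : Nat) : (2 * y) &&& (2 * y - 1) = 2 * (y &&& (y - 1)) := by
  apply Nat.eq_of_testBit_eq
  intro i
  rw [Nat.testBit_and]
  cases i with
  | zero => simp [Nat.testBit_zero]
  | succ i =>
      simp only [Nat.testBit_succ]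
      rw [show 2*y/2 = y by omega, show (2*y-1)/2 = y-1 by omega,
          show 2*(y &&& (y-1))/2 = y &&& (y-1) by omega, Nat.testBit_and]

lemma xor_two_mul (a b : Nat) : (2 * a) ^^^ (2 * b) = 2 * (a ^^^ b) := by
  apply Nat.eq_of_testBit_eq
  intro i
  rw [Nat.testBit_xor]
  cases i with
  | zero => simp [Nat.testBit_zero]
  | succ i =>
      simp only [Nat.testBit_succ]
      rw [show 2*a/2 = a by omega, show 2*b/2 = b by omega,
          show 2*(a ^^^ b)/2 = a ^^^ b by omega, Nat.testBit_xor]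

lemma log2_two_mul (b : Nat) (h : b ≠ 0) : Nat.log2 (2*b) = Nat.log2 b + 1 := by
  have hb : (2*b) >>> 1 = b := by simp [Nat.shiftRight_one]
  have := Nat.log2_eq_succ_log2_shiftRight (n := 2*b) (by rw [hb]; exact h)
  rw [this, hb]

lemma xor_and_pred_ne_zero (x : Nat) (h : x ≠ 0) : x ^^^ (x &&& (x - 1)) ≠ 0 := by
  intro hc
  have := Nat.xor_eq_zero_iff.1 hc
  have hle : x &&& (x - 1) ≤ x - 1 := Nat.and_le_right
  omega

lemma bitsOf_two_mul (z : Nat) : bitsOf (2 * z) = (bitsOf z).map (· + 1) := by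
  by_cases hz : z = 0
  · subst hz; rw [bitsOf]; simp
  · rw [bitsOf]
    have : ¬ (2 * z = 0) := by omega
    simp only [this, dite_false]
    rw [show 2 * z % 2 = 0 by omega, show 2 * z / 2 = z by omega]
    simp

-- The key decomposition: bitsOf x = lowest-bit index :: bitsOf (x with lowest bit cleared).
lemma bitsOf_cons (x : Nat) (h : x ≠ 0) :
    bitsOf x = (Nat.log2 (x ^^^ (x &&& (x - 1))) : Int) :: bitsOf (x &&& (x - 1)) := by
  induction x using Nat.strong_induction_on with
  | _ x ih =>
    by_cases hpar : x % 2 = 1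
    · -- odd: lowest bit is bit 0
      rw [and_pred_of_odd x hpar, xor_pred_of_odd x hpar]
      rw [bitsOf]
      simp only [h, dite_false, hpar, if_true]
      have hlog : Nat.log2 1 = 0 := by decide
      rw [hlog]
      by_cases h1 : x = 1
      · subst h1; simp [bitsOf]
      · rw [show (bitsOf (x-1)) = (if (x-1) % 2 = 1 then [0] else []) ++ (bitsOf ((x-1)/2)).map (· + 1) from by
            rw [bitsOf]; simp [show ¬ (x - 1 = 0) by omega]]
        rw [show (x-1) % 2 = 0 by omega, show (x-1)/2 = x/2 by omega]
        simp
    · -- even: x = 2 * y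
      obtain ⟨y, rfl⟩ : ∃ y, x = 2 * y := ⟨x / 2, by omega⟩
      have hy : y ≠ 0 := by omega
      have ihy := ih y (by omega) hy
      rw [bitsOf_two_mul, ihy]
      rw [and_two_mul, xor_two_mul, bitsOf_two_mul,
          log2_two_mul _ (xor_and_pred_ne_zero y hy)]
      simp

lemma set_add_eq (s : PySem.Set Int) (a : Int) (h : a ∉ s) :
    PySem.Set.add s a = s ++ [a] := by
  simp [PySem.Set.add, PySem.Set.contains, h]

lemma loopA_spec (x : Nat) (pos offset : Int) (out : PySem.Set Int)
    (h : ∀ a ∈ out, a < pos + offset) :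
    bitsLoopA x pos offset out = out ++ (bitsOf x).map (fun i => pos + offset + i) := by
  induction x using Nat.strong_induction_on generalizing pos out with
  | _ x ih =>
    rw [bitsLoopA, bitsOf]
    by_cases h0 : x = 0
    · simp [h0]
    · simp only [h0, dite_false]
      have hrec := ih (x / 2) (Nat.div_lt_self (Nat.pos_of_ne_zero h0) one_lt_two) (pos + 1)
      by_cases hpar : x % 2 = 1
      · simp only [if_pos hpar]
        rw [set_add_eq out (pos + offset) (fun hc => absurd (h _ hc) (by omega))]
        rw [hrec (out ++ [pos + offset]) (by
          intro a ha
          rcases List.mem_append.1 ha with ha | ha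
          · have := h a ha; omega
          · simp at ha; omega)]
        simp only [List.map_append, List.map_map, List.map_cons, List.map_nil,
          List.append_assoc, List.singleton_append]
        congr 2
        · omega
        · exact List.map_congr_left (fun i _ => by simp only [Function.comp_apply]; omega)
      · simp only [if_neg hpar]
        rw [hrec out (by intro a ha; have := h a ha; omega)]
        simp only [List.map_append, List.map_map, List.map_nil, List.nil_append]
        congr 1
        exact List.map_congr_left (fun i _ => by simp only [Function.comp_apply]; omega)

lemma loopB_spec (x : Nat) (offset : Int) (out : PySem.Set Int)
    (h : ∀ a ∈ out, ∀ i ∈ bitsOf x, a < offset + i) :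
    bitsLoopB x offset out = out ++ (bitsOf x).map (fun i => offset + i) := by
  induction x using Nat.strong_induction_on generalizing out with
  | _ x ih =>
    rw [bitsLoopB]
    by_cases h0 : x = 0
    · simp [h0, bitsOf]
    · simp only [h0, dite_false]
      have hdec := bitsOf_cons x h0
      set t := Nat.log2 (x ^^^ (x &&& (x - 1))) with ht
      set x' := x &&& (x - 1) with hx'
      have ht_mem : (t : Int) ∈ bitsOf x := by rw [hdec]; exact List.mem_cons_self ..
      have hfresh : ((t : Int) + offset) ∉ out := fun hc => by
        have := h _ hc _ ht_mem; omega
      rw [set_add_eq out _ hfresh]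
      have hlt : x' < x :=
        Nat.lt_of_le_of_lt (Nat.and_le_right) (Nat.sub_lt (Nat.pos_of_ne_zero h0) one_pos)
      have hpw : ∀ i ∈ bitsOf x', (t : Int) < i := by
        have := bitsOf_pairwise x
        rw [hdec] at this
        exact (List.pairwise_cons.1 this).1
      rw [ih x' hlt (out ++ [(t : Int) + offset]) (by
        intro a ha i hi
        rcases List.mem_append.1 ha with ha | ha
        · exact h a ha i (by rw [hdec]; exact List.mem_cons_of_mem _ hi)
        · simp at ha
          have := hpw i hi
          omega)]
      rw [hdec]
      simp only [List.map_cons, List.append_assoc, List.singleton_append]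
      congr 2
      omega

-- ===== VERDICT (by name: the statement is the Claim_ definition above) =====
theorem BitsToSetWithOffset_spec : Claim_equal_BitsToSetWithOffset := by
  intro x offset _
  unfold Spec_BitsToSetWithOffset BitsToSetWithOffset BitsToSetWithOffset_alt
  rw [loopA_spec _ _ _ _ (by simp [PySem.Set.empty]),
      loopB_spec _ _ _ (by simp [PySem.Set.empty])]
  exact congrArg _ (List.map_congr_left (fun i _ => by omega))
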